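-- pv_equiv track=rewrite | github.com/sakenuGOD/antifake | test_brutal.py | check_composite_subs
-- ===== SOURCE A (Python) =====
-- def check_composite_subs(result, expected_subs):
--     sub_verdicts = result.get("sub_verdicts", [])
--     if not sub_verdicts or not expected_subs:
--         return False
--     actual_statuses = [sv.get("status", "").upper() for sv in sub_verdicts]
--     expected_sorted = sorted(expected_subs)
--     actual_sorted = sorted(actual_statuses[:len(expected_subs)])
--     return expected_sorted == actual_sorted
-- ===== SOURCE B (Python) =====
-- def check_composite_subs(result, expected_subs):
--     sub_verdicts = result.get("sub_verdicts", [])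
--     if not sub_verdicts or not expected_subs:
--         return False
--     counts = {}
--     for s in expected_subs:
--         counts[s] = counts.get(s, 0) + 1
--     for sv in sub_verdicts[:len(expected_subs)]:
--         s = sv.get("status", "").upper()
--         c = counts.get(s, 0)
--         if c == 0:
--             return False
--         counts[s] = c - 1
--     return all(v == 0 for v in counts.values())
-- ===== Notes on version B (the rewrite author's own statement) =====
-- stated objective: alternative
-- what changed: Replaces sort-both-lists-and-compare with a frequency-table multiset check: counts of expected statuses are built in a dict, then decremented (with early exit) while scanning the actual statuses.
import Mathlib
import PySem

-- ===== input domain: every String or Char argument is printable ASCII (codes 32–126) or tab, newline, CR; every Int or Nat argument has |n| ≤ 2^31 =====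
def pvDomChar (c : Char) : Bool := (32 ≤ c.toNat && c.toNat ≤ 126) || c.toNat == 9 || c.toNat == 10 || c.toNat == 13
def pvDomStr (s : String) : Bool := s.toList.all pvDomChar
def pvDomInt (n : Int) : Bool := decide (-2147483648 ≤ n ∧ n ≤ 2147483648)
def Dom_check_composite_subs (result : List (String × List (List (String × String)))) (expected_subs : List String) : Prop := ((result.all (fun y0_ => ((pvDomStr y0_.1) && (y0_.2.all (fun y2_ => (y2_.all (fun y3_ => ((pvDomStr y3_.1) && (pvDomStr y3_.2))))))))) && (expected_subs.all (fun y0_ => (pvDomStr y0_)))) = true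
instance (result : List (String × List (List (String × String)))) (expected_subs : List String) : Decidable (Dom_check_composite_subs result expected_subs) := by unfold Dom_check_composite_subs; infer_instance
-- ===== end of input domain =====

-- B replaces sorting both lists with a frequency-table (counting) multiset check; alternative algorithm, same return value.

-- ===== PORT A =====
-- shared status extraction: sv.get("status", "").upper()
def pvStatus (sv : List (String × String)) : String :=
  PySem.Str.upper ((PySem.Dict.mk sv).getD "status" "")

def check_composite_subs (result : List (String × List (List (String × String)))) (expected_subs : List String) : Bool :=
  let sub_verdicts := (PySem.Dict.mk result).getD "sub_verdicts" []
  if sub_verdicts.isEmpty || expected_subs.isEmpty then false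
  else
    let actual_statuses := sub_verdicts.map pvStatus
    let expected_sorted := PySem.List.sorted expected_subs (fun x => x) false
    let actual_sorted := PySem.List.sorted (PySem.List.slice actual_statuses none (some (expected_subs.length : Int))) (fun x => x) false
    expected_sorted == actual_sorted

-- ===== PORT B =====
-- the second loop of Source B: decrement the count of each actual status, early False on a missing
-- status, then check every remaining count is zero
def pvConsume (counts : PySem.Dict String Int) : List (List (String × String)) → Bool
  | [] => counts.values.all (fun v => v == 0)
  | sv :: rest =>
    let s := pvStatus sv
    let c := counts.getD s 0
    if c == 0 then false
    else pvConsume (counts.insert s (c - 1)) rest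

def check_composite_subs_alt (result : List (String × List (List (String × String)))) (expected_subs : List String) : Bool :=
  let sub_verdicts := (PySem.Dict.mk result).getD "sub_verdicts" []
  if sub_verdicts.isEmpty || expected_subs.isEmpty then false
  else
    let counts := expected_subs.foldl (fun d s => d.insert s (d.getD s 0 + 1)) PySem.Dict.empty
    pvConsume counts (PySem.List.slice sub_verdicts none (some (expected_subs.length : Int)))

-- ===== PRECONDITION & SPEC =====
def Spec_check_composite_subs (result : List (String × List (List (String × String)))) (expected_subs : List String) (out : Bool) : Prop := out = check_composite_subs_alt result expected_subs
instance (result : List (String × List (List (String × String)))) (expected_subs : List String) (out : Bool) : Decidable (Spec_check_composite_subs result expected_subs out) := by unfold Spec_check_composite_subs; infer_instance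

-- ===== CLAIM (what is proved, stated in full; the proofs are below) =====
def Claim_equal_check_composite_subs : Prop := ∀ (result : List (String × List (List (String × String)))) (expected_subs : List String), Dom_check_composite_subs result expected_subs → Spec_check_composite_subs result expected_subs (check_composite_subs result expected_subs)

-- ===== LEMMAS AND PROOFS =====

lemma values_all_zero_iff (d : PySem.Dict String Int) (hnd : d.keys.Nodup) :
    (d.values.all (fun v : Int => v == 0) = true) ↔ ∀ s, d.getD s 0 = 0 := by
  rw [PySem.Dict.values_eq_map_keys d hnd 0]
  simp only [List.all_map, List.all_eq_true, Function.comp, beq_iff_eq]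
  constructor
  · intro h s
    by_cases hs : s ∈ d.keys
    · exact h s hs
    · apply PySem.Dict.getD_of_not_contains
      rw [PySem.Dict.contains_eq_decide_mem_keys]
      simp [hs]
  · intro h s _
    exact h s

lemma pvConsume_true_iff (l : List (List (String × String))) (d : PySem.Dict String Int)
    (hnd : d.keys.Nodup) :
    pvConsume d l = true ↔ ∀ s, d.getD s 0 = ((l.map pvStatus).count s : Int) := by
  induction l generalizing d with
  | nil =>
    simpa [pvConsume] using values_all_zero_iff d hnd
  | cons sv rest ih =>
    simp only [pvConsume]
    by_cases hc : d.getD (pvStatus sv) 0 = 0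
    · simp only [hc, beq_self_eq_true, if_true, Bool.false_eq_true, false_iff]
      intro h
      have hx := h (pvStatus sv)
      rw [hc] at hx
      simp only [List.map_cons, List.count_cons, beq_self_eq_true, if_true] at hx
      omega
    · have hcb : (d.getD (pvStatus sv) 0 == 0) = false := by simpa using hc
      rw [hcb]
      simp only [Bool.false_eq_true, if_false]
      rw [ih _ (PySem.Dict.nodup_keys_insert d _ _ hnd)]
      constructor
      · intro h s
        have hs := h s
        rw [PySem.Dict.getD_insert] at hs
        simp only [List.map_cons, List.count_cons]
        by_cases hx : s = pvStatus sv
        · subst hx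
          rw [if_pos rfl] at hs
          simp only [beq_self_eq_true, if_true]
          omega
        · rw [if_neg hx] at hs
          simp only [Ne.symm hx, beq_iff_eq, if_false]
          omega
      · intro h s
        have hs := h s
        rw [PySem.Dict.getD_insert]
        simp only [List.map_cons, List.count_cons] at hs
        by_cases hx : s = pvStatus sv
        · subst hx
          rw [if_pos rfl]
          simp only [beq_self_eq_true, if_true] at hs
          omega
        · rw [if_neg hx]
          simp only [Ne.symm hx, beq_iff_eq, if_false] at hs
          omega

-- ===== VERDICT (by name: the statement is the Claim_ definition above) =====
theorem check_composite_subs_spec : Claim_equal_check_composite_subs := by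
  intro result expected_subs _
  unfold Spec_check_composite_subs check_composite_subs check_composite_subs_alt
  simp only []
  set sv := (PySem.Dict.mk result).getD "sub_verdicts" [] with hsv
  by_cases hg : (sv.isEmpty || expected_subs.isEmpty) = true
  · rw [if_pos hg, if_pos hg]
  · rw [if_neg hg, if_neg hg]
    have hslice : PySem.List.slice (sv.map pvStatus) none (some (expected_subs.length : Int))
        = (PySem.List.slice sv none (some (expected_subs.length : Int))).map pvStatus := by
      rw [PySem.List.slice_to _ (by positivity), PySem.List.slice_to _ (by positivity),
        List.map_take]
    rw [hslice]
    set aslice := PySem.List.slice sv none (some (expected_subs.length : Int))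
    have hcounter : expected_subs.foldl (fun d s => d.insert s (d.getD s 0 + 1)) PySem.Dict.empty
        = PySem.Dict.counter expected_subs :=
      PySem.Dict.foldl_insert_getD_add_one_eq_counter expected_subs
    rw [hcounter, Bool.eq_iff_iff]
    rw [pvConsume_true_iff _ _ (PySem.Dict.nodup_keys_counter expected_subs)]
    simp only [PySem.Dict.getD_counter]
    rw [beq_iff_eq, PySem.List.sorted_id_eq_sorted_id_iff_perm, List.perm_iff_count]
    constructor
    · intro h s
      rw [h s]
    · intro h s
      have := h s
      omega
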